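-- pv_equiv track=rewrite | github.com/eslip96/JUMP_MAN_GAME | check_out.py | checkout_time
-- ===== SOURCE A (Python) =====
-- def checkout_time(customers, n):
--     if not customers:
--         return 0
--
--     if n >= len(customers):
--         return max(customers)
--
--     registers = [0] * n
--
--     customers.sort(reverse=True)
--
--     for customer in customers:
--         min_time_register = min(registers)
--         min_time_index = registers.index(min_time_register)
--
--         registers[min_time_index] += customer
--
--     return max(registers)
-- ===== SOURCE B (Python) =====
-- def checkout_time(customers, n):
--     # B keeps the register loads in a sorted array: the minimum is always load[0],
--     # and after serving a customer the new load is re-inserted by shifting (no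
--     # min()/index() scans). Note: A sorts `customers` in place; B does not mutate it.
--     if not customers:
--         return 0
--     if n >= len(customers):
--         return max(customers)
--     load = [0] * n  # ascending order invariant
--     for c in sorted(customers, reverse=True):
--         x = load[0] + c
--         i = 1
--         while i < n and load[i] < x:
--             load[i - 1] = load[i]
--             i += 1
--         load[i - 1] = x
--     return load[-1]
-- ===== Notes on version B (the rewrite author's own statement) =====
-- stated objective: alternative
-- what changed: A rescans the register array with min() and .index() for every customer; B keeps the loads in a sorted array, takes the minimum at position 0 and re-inserts the updated load by shifting, returning the last element.
import Mathlib
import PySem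

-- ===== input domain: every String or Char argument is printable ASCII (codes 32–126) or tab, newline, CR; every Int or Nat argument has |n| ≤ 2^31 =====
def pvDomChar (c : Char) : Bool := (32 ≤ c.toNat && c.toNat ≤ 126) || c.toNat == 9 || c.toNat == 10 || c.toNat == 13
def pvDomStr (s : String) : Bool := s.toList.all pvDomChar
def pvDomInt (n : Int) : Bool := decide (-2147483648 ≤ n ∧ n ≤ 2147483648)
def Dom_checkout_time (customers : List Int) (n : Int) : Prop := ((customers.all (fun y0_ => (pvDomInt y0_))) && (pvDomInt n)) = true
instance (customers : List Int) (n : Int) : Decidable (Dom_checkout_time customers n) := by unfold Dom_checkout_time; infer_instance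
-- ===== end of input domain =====

-- B replaces A's per-customer min()/index() scans by a sorted load array with shift-insertion
-- (return-value equivalence only: A sorts `customers` in place, B does not mutate it).


-- ===== PORT A =====
def checkout_time (customers : List Int) (n : Int) : Int :=
  if customers = [] then 0
  else if n ≥ (customers.length : Int) then (PySem.List.max? customers (fun x => x)).getD 0
  else
    let registers : List Int := List.replicate n.toNat 0
    let cs := PySem.List.sorted customers (fun x => x) true
    let final := cs.foldl (fun r c =>
      let m := (PySem.List.min? r (fun x => x)).getD 0
      let i := (PySem.List.index? r m).getD 0
      r.set i (r.getD i 0 + c)) registers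
    (PySem.List.max? final (fun x => x)).getD 0

-- ===== PORT B =====
-- Source B's inner while loop: shift the tail left while it is < x, drop x in the gap
-- (= insert x into the ascending tail before the first element ≥ x).
def pvInsertAsc (x : Int) : List Int → List Int
  | [] => [x]
  | y :: ys => if y < x then y :: pvInsertAsc x ys else x :: y :: ys

def checkout_time_alt (customers : List Int) (n : Int) : Int :=
  if customers = [] then 0
  else if n ≥ (customers.length : Int) then (PySem.List.max? customers (fun x => x)).getD 0
  else
    let load : List Int := List.replicate n.toNat 0
    let final := (PySem.List.sorted customers (fun x => x) true).foldl
      (fun s c =>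
        match s with
        | [] => []
        | y :: ys => pvInsertAsc (y + c) ys) load
    (PySem.List.pyGet? final (-1)).getD 0

-- ===== PRECONDITION & SPEC =====
-- Pre_ excludes exactly the inputs where Python A raises: customers nonempty with n ≤ 0
-- makes `registers` empty and min([]) a ValueError (B raises IndexError there too).
def Pre_checkout_time (customers : List Int) (n : Int) : Prop := customers = [] ∨ 1 ≤ n
instance (customers : List Int) (n : Int) : Decidable (Pre_checkout_time customers n) := by unfold Pre_checkout_time; infer_instance
def pvWitness_checkout_time : List Int × Int := ([5, 3, 2], 2)
def Spec_checkout_time (customers : List Int) (n : Int) (out : Int) : Prop := out = checkout_time_alt customers n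
instance (customers : List Int) (n : Int) (out : Int) : Decidable (Spec_checkout_time customers n out) := by unfold Spec_checkout_time; infer_instance

-- ===== CLAIM (what is proved, stated in full; the proofs are below) =====
def Claim_equal_checkout_time : Prop := ∀ (customers : List Int) (n : Int), Dom_checkout_time customers n → Pre_checkout_time customers n → Spec_checkout_time customers n (checkout_time customers n)

-- ===== LEMMAS AND PROOFS =====

theorem pvInsertAsc_perm (x : Int) (l : List Int) : (pvInsertAsc x l).Perm (x :: l) := by
  induction l with
  | nil => simp [pvInsertAsc]
  | cons y ys ih =>
    simp only [pvInsertAsc]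
    split
    · exact ((ih.cons y).trans (List.Perm.swap x y ys))
    · exact List.Perm.refl _

theorem pvInsertAsc_pairwise (x : Int) (l : List Int) (h : l.Pairwise (· ≤ ·)) :
    (pvInsertAsc x l).Pairwise (· ≤ ·) := by
  induction l with
  | nil => simp [pvInsertAsc]
  | cons y ys ih =>
    rcases List.pairwise_cons.mp h with ⟨hy, hys⟩
    simp only [pvInsertAsc]
    split
    · rename_i hyx
      refine List.pairwise_cons.mpr ⟨?_, ih hys⟩
      intro z hz
      rcases List.mem_cons.mp ((pvInsertAsc_perm x ys).mem_iff.mp hz) with h1 | h1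
      · omega
      · exact hy z h1
    · rename_i hyx
      refine List.pairwise_cons.mpr ⟨?_, h⟩
      intro z hz
      rcases List.mem_cons.mp hz with h1 | h1
      · omega
      · exact le_trans (by omega) (hy z h1)

-- A's step (min + index + in-place add) agrees, up to permutation, with B's step on the sorted list.
theorem step_perm (r : List Int) (y : Int) (ys : List Int) (c : Int)
    (hperm : r.Perm (y :: ys)) (hsort : (y :: ys).Pairwise (· ≤ ·)) :
    (r.set ((PySem.List.index? r ((PySem.List.min? r (fun x => x)).getD 0)).getD 0)
        (r.getD ((PySem.List.index? r ((PySem.List.min? r (fun x => x)).getD 0)).getD 0) 0 + c)).Perm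
      (pvInsertAsc (y + c) ys) := by
  -- the minimum of r is y (the head of the sorted permutation)
  have hyr : y ∈ r := hperm.mem_iff.mpr (by simp)
  obtain ⟨m, hm⟩ : ∃ m, PySem.List.min? r (fun x => x) = some m := by
    cases hmin : PySem.List.min? r (fun x => x) with
    | none =>
      have : r = [] := (PySem.List.min?_eq_none_iff r (fun x => x)).mp hmin
      exact absurd (this ▸ hyr) (List.not_mem_nil)
    | some m => exact ⟨m, rfl⟩
  have hmem : m ∈ r := PySem.List.min?_mem hm
  have hmin : ∀ z ∈ r, m ≤ z := PySem.List.min?_isMin hm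
  have hylow : ∀ z ∈ r, y ≤ z := by
    intro z hz
    rcases List.mem_cons.mp (hperm.mem_iff.mp hz) with h1 | h1
    · omega
    · exact (List.pairwise_cons.mp hsort).1 z h1
  have hmy : m = y := le_antisymm (hmin y hyr) (hylow m hmem)
  subst hmy
  -- index? finds a valid index holding m
  obtain ⟨i, hi⟩ : ∃ i, PySem.List.index? r m = some i := by
    cases hidx : PySem.List.index? r m with
    | none => exact absurd hmem ((PySem.List.index?_eq_none_iff r m).mp hidx)
    | some i => exact ⟨i, rfl⟩
  obtain ⟨hilt, hri, -⟩ := PySem.List.getElem_of_index?_eq_some hi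
  simp only [hm, hi, Option.getD_some]
  have hget : r.getD i 0 = m := by rw [List.getD_eq_getElem _ _ hilt, hri]
  rw [hget]
  -- r.set i v ~ v :: r.eraseIdx i, and r ~ r[i] :: r.eraseIdx i
  have hperm1 : (r.set i (m + c)).Perm ((m + c) :: r.eraseIdx i) := by
    rw [List.set_eq_take_append_cons_drop, if_pos hilt, List.eraseIdx_eq_take_drop_succ]
    exact List.perm_middle
  have hperm2 : r.Perm (m :: r.eraseIdx i) := by
    conv_lhs => rw [← List.take_append_drop i r, List.drop_eq_getElem_cons hilt, hri]
    rw [List.eraseIdx_eq_take_drop_succ]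
    exact List.perm_middle
  have htail : (r.eraseIdx i).Perm ys := (hperm2.symm.trans hperm).cons_inv
  exact hperm1.trans ((htail.cons (m + c)).trans (pvInsertAsc_perm (m + c) ys).symm)

-- fold invariant: A's register list stays a permutation of B's sorted load list.
theorem fold_inv (cs : List Int) :
    ∀ (r s : List Int), r.Perm s → s.Pairwise (· ≤ ·) →
      (cs.foldl (fun r c =>
          let m := (PySem.List.min? r (fun x => x)).getD 0
          let i := (PySem.List.index? r m).getD 0
          r.set i (r.getD i 0 + c)) r).Perm
        (cs.foldl (fun s c =>
          match s with
          | [] => []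
          | y :: ys => pvInsertAsc (y + c) ys) s) ∧
      (cs.foldl (fun s c =>
          match s with
          | [] => []
          | y :: ys => pvInsertAsc (y + c) ys) s).Pairwise (· ≤ ·) := by
  induction cs with
  | nil => intro r s h hs; exact ⟨h, hs⟩
  | cons c cs ih =>
    intro r s hperm hsort
    simp only [List.foldl_cons]
    cases s with
    | nil =>
      have hr : r = [] := hperm.eq_nil
      subst hr
      exact ih _ _ (by simp) (by simp)
    | cons y ys =>
      exact ih _ _ (step_perm r y ys c hperm hsort)
        (pvInsertAsc_pairwise (y + c) ys (hsort.sublist (List.sublist_cons_self y ys)))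

-- in a ≤-sorted nonempty list the last element is maximal
theorem pv_le_getLast (y : Int) (ys : List Int) (hsort : (y :: ys).Pairwise (· ≤ ·)) :
    ∀ z ∈ y :: ys, z ≤ (y :: ys).getLast (by simp) := by
  induction ys generalizing y with
  | nil => intro z hz; simp at hz; simp [hz]
  | cons w ws ih =>
    intro z hz
    rcases List.pairwise_cons.mp hsort with ⟨hy, hws⟩
    rw [List.getLast_cons (by simp)]
    rcases List.mem_cons.mp hz with h1 | h1
    · exact h1 ▸ le_trans (hy w (by simp)) (ih w hws w (by simp))
    · exact ih w hws z h1

theorem last_of_sorted_perm (r s : List Int) (hperm : r.Perm s) (hsort : s.Pairwise (· ≤ ·)) :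
    (PySem.List.max? r (fun x => x)).getD 0 = (PySem.List.pyGet? s (-1)).getD 0 := by
  rw [PySem.List.pyGet?_neg_one]
  cases s with
  | nil =>
    have hr : r = [] := hperm.eq_nil
    subst hr
    rfl
  | cons y ys =>
    have hne : y :: ys ≠ [] := by simp
    rw [List.getLast?_eq_some_getLast hne]
    obtain ⟨M, hM⟩ : ∃ M, PySem.List.max? r (fun x => x) = some M := by
      cases hmax : PySem.List.max? r (fun x => x) with
      | none =>
        have : r = [] := (PySem.List.max?_eq_none_iff r (fun x => x)).mp hmax
        exact absurd (this ▸ hperm).symm.eq_nil hne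
      | some M => exact ⟨M, rfl⟩
    have hMmem : M ∈ r := PySem.List.max?_mem hM
    have hMmax : ∀ z ∈ r, z ≤ M := PySem.List.max?_isMax hM
    simp only [hM, Option.getD_some]
    have hlastmax : ∀ z ∈ y :: ys, z ≤ (y :: ys).getLast hne := pv_le_getLast y ys hsort
    have hlastmem : (y :: ys).getLast hne ∈ y :: ys := List.getLast_mem hne
    exact le_antisymm (hlastmax M (hperm.mem_iff.mp hMmem))
      (hMmax _ (hperm.mem_iff.mpr hlastmem))

-- ===== VERDICT (by name: the statement is the Claim_ definition above) =====
theorem checkout_time_spec : Claim_equal_checkout_time := by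
  intro customers n _ _
  unfold Spec_checkout_time checkout_time checkout_time_alt
  split
  · rfl
  split
  · rfl
  have h := fold_inv (PySem.List.sorted customers (fun x => x) true)
    (List.replicate n.toNat 0) (List.replicate n.toNat 0) (List.Perm.refl _)
    (List.pairwise_replicate.mpr (by simp))
  exact last_of_sorted_perm _ _ h.1 h.2
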